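-- pv_equiv track=rewrite | github.com/Rashad19/Cryptography | Cindex.py | getSequence
-- ===== SOURCE A (Python) =====
-- def getSequence(text, keylength):
--
--     sequences = []
--
--
--     for i in range(keylength):
--
--         sequence = ''
--
--         d = 0
--
--         for j in range(len(text)):
--
--             if i + d > len(text) - 1:
--                 break
--
--             sequence += text[i+d]
--
--             d += keylength
--
--         sequences.append(sequence)
--
--     return sequences
-- ===== SOURCE B (Python) =====
-- def getSequence(text, keylength):
--     if keylength <= 0:
--         return []
--     sequences = [''] * keylength
--     for idx, ch in enumerate(text):
--         sequences[idx % keylength] += ch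
--     return sequences
-- ===== Notes on version B (the rewrite author's own statement) =====
-- stated objective: simpler
-- what changed: Replaces A's keylength separate strided scans of the text (one inner loop with a break per key position) by a single round-robin pass that appends each character to slot index mod keylength.
import Mathlib
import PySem

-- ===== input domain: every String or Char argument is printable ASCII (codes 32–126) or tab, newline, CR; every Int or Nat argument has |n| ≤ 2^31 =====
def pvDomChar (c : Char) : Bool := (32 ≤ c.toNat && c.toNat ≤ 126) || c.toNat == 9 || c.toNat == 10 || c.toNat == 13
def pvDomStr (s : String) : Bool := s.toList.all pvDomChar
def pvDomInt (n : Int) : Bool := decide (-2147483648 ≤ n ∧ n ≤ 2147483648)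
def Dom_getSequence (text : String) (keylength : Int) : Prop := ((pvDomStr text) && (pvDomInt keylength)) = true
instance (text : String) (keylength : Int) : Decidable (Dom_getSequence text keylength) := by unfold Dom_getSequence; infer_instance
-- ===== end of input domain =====

-- B replaces A's keylength separate strided scans of the text by a single round-robin
-- pass distributing each character to slot (index mod keylength); objective: simpler one-pass form.

-- ===== PORT A =====
-- inner 'for j in range(len(text))' loop of A: js is the (value-ignored) range list,
-- seq/d the loop state; 'break' becomes returning seq.  text[i+d] is always in range
-- when read (guarded by the break), so pyGetD's default is never used.
def getSequenceInner (cs : List Char) (keylength : Int) (i : Int) :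
    List Int → List Char → Int → List Char
  | [], seq, _ => seq
  | _ :: js, seq, d =>
    if i + d > (cs.length : Int) - 1 then seq
    else getSequenceInner cs keylength i js (seq ++ [PySem.List.pyGetD cs (i + d) ' ']) (d + keylength)

def getSequence (text : String) (keylength : Int) : List String :=
  let cs := text.toList
  (PySem.List.pyRange 0 keylength 1).foldl
    (fun sequences i =>
      sequences ++ [String.ofList (getSequenceInner cs keylength i
        (PySem.List.pyRange 0 (cs.length : Int) 1) [] 0)])
    []

-- ===== PORT B =====
def getSequence_alt (text : String) (keylength : Int) : List String :=
  if keylength ≤ 0 then []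
  else
    (((PySem.List.enumerate text.toList 0).foldl
      (fun seqs p =>
        PySem.List.pySetD seqs (PySem.Int.mod p.1 keylength)
          (PySem.List.pyGetD seqs (PySem.Int.mod p.1 keylength) [] ++ [p.2]))
      (PySem.List.pyRepeat [([] : List Char)] keylength)).map String.ofList)

-- ===== PRECONDITION & SPEC =====
def Spec_getSequence (text : String) (keylength : Int) (out : List String) : Prop := out = getSequence_alt text keylength
instance (text : String) (keylength : Int) (out : List String) : Decidable (Spec_getSequence text keylength out) := by unfold Spec_getSequence; infer_instance

-- ===== CLAIM (what is proved, stated in full; the proofs are below) =====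
def Claim_equal_getSequence : Prop := ∀ (text : String) (keylength : Int), Dom_getSequence text keylength → Spec_getSequence text keylength (getSequence text keylength)

-- ===== LEMMAS AND PROOFS =====

-- chars of cs at positions p, p+k, p+2k, … (k ≥ 1)
def strideL (k : Nat) : List Char → Nat → List Char
  | [], _ => []
  | c :: rest, p => if p = 0 then c :: strideL k rest (k - 1) else strideL k rest (p - 1)

theorem strideL_nil (k p : Nat) : strideL k [] p = [] := rfl

theorem strideL_ge (k : Nat) : ∀ (cs : List Char) (p : Nat), cs.length ≤ p → strideL k cs p = [] := by
  intro cs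
  induction cs with
  | nil => intro p _; rfl
  | cons c rest ih =>
    intro p hp
    simp only [List.length_cons] at hp
    have hp0 : p ≠ 0 := by omega
    simp only [strideL, hp0, if_false]
    exact ih (p - 1) (by omega)

theorem strideL_at (k : Nat) (hk : 1 ≤ k) :
    ∀ (cs : List Char) (p : Nat) (h : p < cs.length),
      strideL k cs p = cs[p] :: strideL k cs (p + k) := by
  intro cs
  induction cs with
  | nil => intro p h; simp at h
  | cons c rest ih =>
    intro p h
    by_cases hp : p = 0
    · subst hp
      have hkk : 0 + k = k := by omega
      have hk0 : k ≠ 0 := by omega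
      simp only [strideL, List.getElem_cons_zero, hkk]
      simp [hk0]
    · obtain ⟨q, rfl⟩ : ∃ q, p = q + 1 := ⟨p - 1, by omega⟩
      have hql : q < rest.length := by simp at h; omega
      have h1 : q + 1 + k - 1 = q + k := by omega
      simp only [strideL, Nat.succ_ne_zero, if_false, Nat.add_sub_cancel,
        List.getElem_cons_succ]
      rw [ih q hql]
      have hne : q + 1 + k ≠ 0 := by omega
      simp only [hne, if_false, h1]

-- A's inner loop computes the stride starting at i+d, given enough fuel
theorem ainner_eq (cs : List Char) (k : Int) (hk : 0 < k) (i : Int) :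
    ∀ (js : List Int) (acc : List Char) (d : Int), 0 ≤ i → 0 ≤ d →
      (cs.length : Int) ≤ i + d + js.length * k →
      getSequenceInner cs k i js acc d = acc ++ strideL k.toNat cs (i + d).toNat := by
  intro js
  induction js with
  | nil =>
    intro acc d hi hd hfuel
    simp only [List.length_nil, Nat.cast_zero, zero_mul, add_zero] at hfuel
    simp only [getSequenceInner]
    rw [strideL_ge _ _ _ (by omega)]
    simp
  | cons j js ih =>
    intro acc d hi hd hfuel
    simp only [getSequenceInner]
    by_cases hbr : i + d > (cs.length : Int) - 1
    · rw [if_pos hbr, strideL_ge _ _ _ (by omega)]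
      simp
    · rw [if_neg hbr]
      have hlt : (i + d).toNat < cs.length := by omega
      have hget : PySem.List.pyGetD cs (i + d) ' ' = cs[(i + d).toNat] := by
        rw [PySem.List.pyGetD_of_nonneg (h := by omega)]
        simp [List.getD_eq_getElem?_getD, List.getElem?_eq_getElem hlt]
      rw [ih (acc ++ [PySem.List.pyGetD cs (i + d) ' ']) (d + k) hi (by omega)
        (by simp only [List.length_cons] at hfuel ⊢; push_cast at hfuel ⊢; nlinarith)]
      rw [hget, strideL_at k.toNat (by omega) cs (i + d).toNat hlt]
      have : (i + (d + k)).toNat = (i + d).toNat + k.toNat := by omega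
      rw [this]
      simp

-- x % K for x < 2K, without mod
theorem mod2 (x K : Nat) (h : x < 2 * K) : x % K = if x < K then x else x - K := by
  split_ifs with hx
  · exact Nat.mod_eq_of_lt hx
  · rw [Nat.mod_eq_sub_mod (by omega)]
    exact Nat.mod_eq_of_lt (by omega)

-- distance from position s to the next position landing in slot m
def distSlot (K s m : Nat) : Nat := (m + K - s % K) % K

theorem succ_mod (K s : Nat) (hK : 0 < K) :
    (s + 1) % K = if s % K + 1 < K then s % K + 1 else 0 := by
  have ha : s % K < K := Nat.mod_lt _ hK
  rcases Nat.lt_or_ge 1 K with h2 | h2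
  · have h1K : 1 % K = 1 := Nat.mod_eq_of_lt h2
    rw [Nat.add_mod s 1 K, h1K]
    split_ifs with hb
    · exact Nat.mod_eq_of_lt hb
    · have hsk : s % K + 1 = K := by omega
      rw [hsk, Nat.mod_self]
  · have hK1 : K = 1 := by omega
    subst hK1
    simp [Nat.mod_one]

theorem distSlot_eq (K s m : Nat) (hK : 0 < K) (hm : m < K) :
    distSlot K s m = if s % K ≤ m then m - s % K else m + K - s % K := by
  have ha : s % K < K := Nat.mod_lt _ hK
  unfold distSlot
  rw [mod2 (m + K - s % K) K (by omega)]
  split_ifs <;> omega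

theorem distSlot_zero (K m : Nat) (hK : 0 < K) (hm : m < K) : distSlot K 0 m = m := by
  rw [distSlot_eq K 0 m hK hm, Nat.zero_mod]
  simp

theorem distSlot_eq_zero_iff (K s m : Nat) (hK : 0 < K) (hm : m < K) :
    distSlot K s m = 0 ↔ m = s % K := by
  have ha : s % K < K := Nat.mod_lt _ hK
  rw [distSlot_eq K s m hK hm]
  split_ifs <;> omega

theorem distSlot_succ_self (K s m : Nat) (hK : 0 < K) (hm : m < K) (h : m = s % K) :
    distSlot K (s + 1) m = K - 1 := by
  have ha : s % K < K := Nat.mod_lt _ hK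
  have ha1 : (s + 1) % K < K := Nat.mod_lt _ hK
  rw [distSlot_eq K (s + 1) m hK hm, succ_mod K s hK]
  split_ifs <;> omega

theorem distSlot_succ_ne (K s m : Nat) (hK : 0 < K) (hm : m < K) (h : m ≠ s % K) :
    distSlot K (s + 1) m = distSlot K s m - 1 := by
  have ha : s % K < K := Nat.mod_lt _ hK
  rw [distSlot_eq K (s + 1) m hK hm, distSlot_eq K s m hK hm, succ_mod K s hK]
  split_ifs <;> omega

theorem map_getD_range {α : Type} (l : List α) (d : α) :
    (List.range l.length).map (fun m => l.getD m d) = l := by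
  apply List.ext_getElem
  · simp
  · intro i h1 h2
    simp [List.getD_eq_getElem?_getD, List.getElem?_eq_getElem h2]

-- B's fold distributes the characters of cs (indexed from s) round-robin into the slots
theorem b_inv (k : Int) (hk : 0 < k) (cs : List Char) :
    ∀ (s : Nat) (seqs : List (List Char)), seqs.length = k.toNat →
    List.foldl (fun seqs p => PySem.List.pySetD seqs (PySem.Int.mod p.1 k)
        (PySem.List.pyGetD seqs (PySem.Int.mod p.1 k) ([] : List Char) ++ [p.2])) seqs
      (PySem.List.enumerate cs (s : Int))
    = (List.range k.toNat).map
        (fun m => seqs.getD m [] ++ strideL k.toNat cs (distSlot k.toNat s m)) := by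
  have hkK : ((k.toNat : Nat) : Int) = k := Int.toNat_of_nonneg (le_of_lt hk)
  have hK : 0 < k.toNat := by omega
  induction cs with
  | nil =>
    intro s seqs hlen
    rw [PySem.List.enumerate_nil]
    simp only [List.foldl_nil, strideL_nil, List.append_nil]
    rw [← hlen, map_getD_range]
  | cons c rest ih =>
    intro s seqs hlen
    rw [PySem.List.enumerate_cons, List.foldl_cons]
    have hcast : (s : Int) + 1 = ((s + 1 : Nat) : Int) := by push_cast; ring
    have hmod : PySem.Int.mod ((s : Nat) : Int) k = ((s % k.toNat : Nat) : Int) := by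
      conv_lhs => rw [← hkK]
      rw [PySem.Int.mod_natCast]
    have hsK : s % k.toNat < k.toNat := Nat.mod_lt _ hK
    have hstep : (PySem.List.pySetD seqs (PySem.Int.mod ((s : Nat) : Int) k)
        (PySem.List.pyGetD seqs (PySem.Int.mod ((s : Nat) : Int) k) ([] : List Char) ++ [c]))
        = seqs.set (s % k.toNat) (seqs.getD (s % k.toNat) [] ++ [c]) := by
      rw [hmod, PySem.List.pySetD_natCast, PySem.List.pyGetD_natCast]
    rw [hcast, hstep, ih (s + 1) _ (by rw [List.length_set, hlen])]
    apply List.map_congr_left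
    intro m hmem
    have hm : m < k.toNat := List.mem_range.mp hmem
    by_cases hcase : m = s % k.toNat
    · have hd0 : distSlot k.toNat s m = 0 :=
        (distSlot_eq_zero_iff _ _ _ hK hm).mpr hcase
      have hget : (seqs.set (s % k.toNat) (seqs.getD (s % k.toNat) [] ++ [c])).getD m []
          = seqs.getD m [] ++ [c] := by
        rw [← hcase, List.getD_eq_getElem?_getD, List.getElem?_set_self (by omega)]
        simp
      rw [hget, distSlot_succ_self _ _ _ hK hm hcase, hd0]
      simp [strideL]
    · have hdne : distSlot k.toNat s m ≠ 0 := by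
        intro h; exact hcase ((distSlot_eq_zero_iff _ _ _ hK hm).mp h)
      have hget : (seqs.set (s % k.toNat) (seqs.getD (s % k.toNat) [] ++ [c])).getD m []
          = seqs.getD m [] := by
        rw [List.getD_eq_getElem?_getD, List.getElem?_set_ne (by omega),
          List.getD_eq_getElem?_getD]
      rw [hget, distSlot_succ_ne _ _ _ hK hm hcase]
      simp [strideL, hdne]

-- A's outer append-fold is a map
theorem foldl_app {α β : Type} (f : α → β) :
    ∀ (l : List α) (acc : List β),
      List.foldl (fun a i => a ++ [f i]) acc l = acc ++ l.map f := by
  intro l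
  induction l with
  | nil => intro acc; simp
  | cons x xs ih => intro acc; simp [ih]

-- ===== VERDICT (by name: the statement is the Claim_ definition above) =====
theorem getSequence_spec : Claim_equal_getSequence := by
  intro text k _
  unfold Spec_getSequence getSequence getSequence_alt
  by_cases hk : k ≤ 0
  · rw [if_pos hk, PySem.List.pyRange_one_eq_nil hk]
    rfl
  · push_neg at hk
    rw [if_neg (by omega)]
    set cs := text.toList with hcs
    have hkK : ((k.toNat : Nat) : Int) = k := Int.toNat_of_nonneg (le_of_lt hk)
    have hK : 0 < k.toNat := by omega
    -- B side: pyRepeat and the round-robin fold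
    rw [PySem.List.pyRepeat_singleton]
    rw [show PySem.List.enumerate cs 0 = PySem.List.enumerate cs ((0 : Nat) : Int) from by norm_num]
    rw [b_inv k hk cs 0 _ List.length_replicate]
    -- A side: the append-fold over range(keylength)
    rw [foldl_app]
    rw [show PySem.List.pyRange 0 k 1 = PySem.List.pyRange 0 ((k.toNat : Nat) : Int) 1 from by
      rw [hkK]]
    rw [PySem.List.pyRange_zero_natCast, PySem.List.pyRange_zero_natCast]
    rw [List.map_map, List.map_map]
    simp only [List.nil_append]
    apply List.map_congr_left
    intro m hm'
    have hm : m < k.toNat := List.mem_range.mp hm'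
    simp only [Function.comp]
    rw [ainner_eq cs k hk (m : Int) _ [] 0 (by positivity) le_rfl
      (by
        simp only [List.length_map, List.length_range]
        have h1 : ((cs.length : Nat) : Int) * 1 ≤ ((cs.length : Nat) : Int) * k :=
          mul_le_mul_of_nonneg_left (by omega) (by positivity)
        have h2 : (0 : Int) ≤ ((m : Nat) : Int) := by positivity
        linarith)]
    rw [distSlot_zero _ _ hK hm]
    simp [List.getD_eq_getElem?_getD, hm]
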